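-- pv_equiv track=rewrite | github.com/alfredronning/adventofcode | 2018/day1/solver2.py | first_repeating
-- ===== SOURCE A (Python) =====
-- def first_repeating(frequencies):
--     frequency_sum = 0
--     seen = set()
--     while True:
--         for frequency in frequencies:
--             frequency_sum += int(frequency)
--             if frequency_sum in seen:
--                 return frequency_sum
--             seen.add(frequency_sum)
-- ===== SOURCE B (Python) =====
-- def first_repeating(frequencies):
--     # one pass: prefix sums and the per-cycle delta
--     ps = []
--     t = 0
--     for f in frequencies:
--         t += int(f)
--         ps.append(t)
--     # earliest duplicate within the first pass
--     seen = set()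
--     for s in ps:
--         if s in seen:
--             return s
--         seen.add(s)
--     # later cycles: cycle k visits s + k*t; it can only collide with a
--     # first-pass value, so probe the fixed first-pass set cycle by cycle
--     k = 1
--     while True:
--         for s in ps:
--             if s + k * t in seen:
--                 return s + k * t
--         k += 1
-- ===== Notes on version B (the rewrite author's own statement) =====
-- stated objective: alternative
-- what changed: B computes the prefix sums once, scans them for a first-pass duplicate, and then probes each later cycle arithmetically (s + k*delta against the fixed first-pass set) instead of replaying the input forever with a running sum and an ever-growing seen set.
import Mathlib
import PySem

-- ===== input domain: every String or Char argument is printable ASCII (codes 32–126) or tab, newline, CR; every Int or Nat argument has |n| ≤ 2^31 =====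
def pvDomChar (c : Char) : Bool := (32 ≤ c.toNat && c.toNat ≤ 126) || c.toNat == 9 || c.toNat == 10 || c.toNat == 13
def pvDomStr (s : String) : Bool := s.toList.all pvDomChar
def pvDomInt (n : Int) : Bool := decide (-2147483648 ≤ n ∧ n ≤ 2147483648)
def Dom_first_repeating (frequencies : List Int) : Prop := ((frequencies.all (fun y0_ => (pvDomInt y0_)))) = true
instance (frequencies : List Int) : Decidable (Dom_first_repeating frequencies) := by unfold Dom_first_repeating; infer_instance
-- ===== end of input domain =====

-- ===== PORT A =====
-- B reorganises the search: one pass of prefix sums, a duplicate scan, then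
-- arithmetic probing of later cycles against the fixed first-pass set (objective: alternative).
-- Python A's `while True` may open-endedly diverge; both loop ports carry a fuel
-- guard (one unit of fuel = one full pass / cycle, default 0 on exhaustion) and the
-- pass-by-pass correspondence below proves the two ports equal at every fuel, so the
-- claim is plain equivalence of the ports on all of Dom.
def pvFuel (frequencies : List Int) : Nat := (frequencies.map Int.natAbs).sum + 2

-- one `for frequency in frequencies` pass: returns (found?, frequency_sum, seen)
def pyA_pass : List Int → Int → PySem.Set Int → Option Int × Int × PySem.Set Int
  | [], s, seen => (none, s, seen)
  | f :: rest, s, seen =>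
    if PySem.Set.contains seen (s + f) then (some (s + f), s + f, seen)
    else pyA_pass rest (s + f) (PySem.Set.add seen (s + f))

def pyA_loop : Nat → List Int → Int → PySem.Set Int → Int
  | 0, _, _, _ => 0
  | fuel+1, l, s, seen =>
    match pyA_pass l s seen with
    | (some v, _, _) => v
    | (none, s', seen') => pyA_loop fuel l s' seen'

def first_repeating (frequencies : List Int) : Int :=
  pyA_loop (pvFuel frequencies + 1) frequencies 0 PySem.Set.empty

-- ===== PORT B =====
-- `for f in frequencies: t += f; ps.append(t)`
def pyB_build : List Int → Int → List Int × Int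
  | [], t => ([], t)
  | f :: rest, t =>
    match pyB_build rest (t + f) with
    | (ps, tf) => ((t + f) :: ps, tf)

-- first-pass duplicate scan, building `seen`
def pyB_scan1 : List Int → PySem.Set Int → Option Int × PySem.Set Int
  | [], seen => (none, seen)
  | s :: rest, seen =>
    if PySem.Set.contains seen s then (some s, seen)
    else pyB_scan1 rest (PySem.Set.add seen s)

-- `for s in ps: if s + k * t in seen: return s + k * t`
def pyB_probe (seen : PySem.Set Int) (k t : Int) : List Int → Option Int
  | [] => none
  | s :: rest =>
    if PySem.Set.contains seen (s + k * t) then some (s + k * t)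
    else pyB_probe seen k t rest

def pyB_loop (seen : PySem.Set Int) (t : Int) (ps : List Int) : Nat → Int → Int
  | 0, _ => 0
  | fuel+1, k =>
    match pyB_probe seen k t ps with
    | some v => v
    | none => pyB_loop seen t ps fuel (k + 1)

def first_repeating_alt (frequencies : List Int) : Int :=
  match pyB_build frequencies 0 with
  | (ps, t) =>
    match pyB_scan1 ps PySem.Set.empty with
    | (some v, _) => v
    | (none, seen) => pyB_loop seen t ps (pvFuel frequencies) 1

-- ===== PRECONDITION & SPEC =====
def Spec_first_repeating (frequencies : List Int) (out : Int) : Prop := out = first_repeating_alt frequencies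
instance (frequencies : List Int) (out : Int) : Decidable (Spec_first_repeating frequencies out) := by unfold Spec_first_repeating; infer_instance

-- ===== CLAIM (what is proved, stated in full; the proofs are below) =====
def Claim_equal_first_repeating : Prop := ∀ (frequencies : List Int), Dom_first_repeating frequencies → Spec_first_repeating frequencies (first_repeating frequencies)

-- ===== LEMMAS AND PROOFS =====

-- prefix sums of l starting from b (proof-side helper)
def psumsFrom (b : Int) : List Int → List Int
  | [] => []
  | f :: r => (b + f) :: psumsFrom (b + f) r


lemma cont_t {s : PySem.Set Int} {x : Int} (h : x ∈ s) : PySem.Set.contains s x = true :=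
  (PySem.Set.contains_iff s x).mpr h
lemma cont_f {s : PySem.Set Int} {x : Int} (h : x ∉ s) : PySem.Set.contains s x = false := by
  cases hc : PySem.Set.contains s x
  · rfl
  · exact absurd ((PySem.Set.contains_iff s x).mp hc) h

lemma psumsFrom_shift (l : List Int) : ∀ (a b : Int),
    psumsFrom (a + b) l = (psumsFrom a l).map (fun s => s + b) := by
  induction l with
  | nil => intro a b; simp [psumsFrom]
  | cons f r ih =>
    intro a b
    have h : a + b + f = (a + f) + b := by ring
    simp only [psumsFrom, List.map, h, ih (a + f) b]

lemma pass_none_sum (l : List Int) : ∀ (b : Int) (sA : PySem.Set Int),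
    (pyA_pass l b sA).1 = none → (pyA_pass l b sA).2.1 = b + l.sum := by
  induction l with
  | nil => intro b sA _; simp [pyA_pass]
  | cons f r ih =>
    intro b sA h
    by_cases hc : b + f ∈ sA
    · simp [pyA_pass, hc] at h
    · simp only [pyA_pass, cont_f hc, Bool.false_eq_true, if_false] at h ⊢
      rw [ih _ _ h, List.sum_cons]; ring

lemma pass_none_mem (l : List Int) : ∀ (b : Int) (sA : PySem.Set Int),
    (pyA_pass l b sA).1 = none →
    ∀ v, (v ∈ (pyA_pass l b sA).2.2 ↔ v ∈ sA ∨ v ∈ psumsFrom b l) := by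
  induction l with
  | nil => intro b sA _ v; simp [pyA_pass, psumsFrom]
  | cons f r ih =>
    intro b sA h v
    by_cases hc : b + f ∈ sA
    · simp [pyA_pass, hc] at h
    · simp only [pyA_pass, cont_f hc, Bool.false_eq_true, if_false] at h ⊢
      rw [ih _ _ h v, psumsFrom]
      simp [PySem.Set.mem_add]
      tauto

lemma probe_none (ls : List Int) : ∀ (sB : PySem.Set Int) (k t : Int),
    pyB_probe sB k t ls = none ↔ ∀ s ∈ ls, s + k * t ∉ sB := by
  induction ls with
  | nil => intro sB k t; simp [pyB_probe]
  | cons s r ih =>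
    intro sB k t
    by_cases hc : s + k * t ∈ sB
    · simp [pyB_probe, hc]
    · simp [pyB_probe, hc, ih]

lemma scan1_eq (l : List Int) : ∀ (b : Int) (s : PySem.Set Int),
    pyB_scan1 (psumsFrom b l) s = ((pyA_pass l b s).1, (pyA_pass l b s).2.2) := by
  induction l with
  | nil => intro b s; simp [pyB_scan1, pyA_pass, psumsFrom]
  | cons f r ih =>
    intro b s
    by_cases hc : b + f ∈ s
    · simp [psumsFrom, pyB_scan1, pyA_pass, hc]
    · simp [psumsFrom, pyB_scan1, pyA_pass, hc, ih]

lemma scan1_none_nodup (ls : List Int) : ∀ (s : PySem.Set Int),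
    (pyB_scan1 ls s).1 = none → ls.Nodup ∧ ∀ x ∈ ls, x ∉ s := by
  induction ls with
  | nil => intro s _; simp
  | cons x r ih =>
    intro s h
    by_cases hc : x ∈ s
    · simp [pyB_scan1, hc] at h
    · simp only [pyB_scan1, cont_f hc, Bool.false_eq_true, if_false] at h
      obtain ⟨hnd, hni⟩ := ih _ h
      have hxs : x ∉ s := hc
      refine ⟨List.nodup_cons.mpr ⟨fun hxr => ?_, hnd⟩, ?_⟩
      · exact (hni x hxr) (by simp [PySem.Set.mem_add])
      · intro y hy
        rcases List.mem_cons.mp hy with rfl | hyr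
        · exact hxs
        · intro hys; exact (hni y hyr) (by simp [PySem.Set.mem_add, hys])

lemma build_eq (l : List Int) : ∀ (t0 : Int),
    pyB_build l t0 = (psumsFrom t0 l, t0 + l.sum) := by
  induction l with
  | nil => intro t0; simp [pyB_build, psumsFrom]
  | cons f r ih =>
    intro t0
    simp only [pyB_build, ih, psumsFrom, List.sum_cons, Prod.mk.injEq]
    exact ⟨trivial, by ring⟩

lemma pass_fst (l : List Int) : ∀ (a k t : Int) (sA sB : PySem.Set Int),
    (∀ s ∈ psumsFrom a l, (s + k * t ∈ sA ↔ s + k * t ∈ sB)) →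
    (psumsFrom a l).Nodup →
    (pyA_pass l (a + k * t) sA).1 = pyB_probe sB k t (psumsFrom a l) := by
  induction l with
  | nil => intro a k t sA sB _ _; simp [pyA_pass, pyB_probe, psumsFrom]
  | cons f r ih =>
    intro a k t sA sB hmem hnd
    have harith : a + k * t + f = (a + f) + k * t := by ring
    have hhead : ((a + f) + k * t ∈ sA ↔ (a + f) + k * t ∈ sB) :=
      hmem (a + f) (by simp [psumsFrom])
    rw [psumsFrom] at hnd ⊢
    by_cases hb : (a + f) + k * t ∈ sB
    · have ha : (a + f) + k * t ∈ sA := hhead.mpr hb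
      simp only [pyA_pass, pyB_probe, harith, cont_t ha, cont_t hb, if_true]
    · have ha : (a + f) + k * t ∉ sA := fun h => hb (hhead.mp h)
      simp only [pyA_pass, pyB_probe, harith, cont_f ha, cont_f hb, Bool.false_eq_true, if_false]
      apply ih (a + f) k t
      · intro s hs
        rw [PySem.Set.mem_add]
        have hne : s ≠ a + f := fun h => (List.nodup_cons.mp hnd).1 (h ▸ hs)
        constructor
        · rintro (h | h)
          · exact (hmem s (by simp [psumsFrom, hs])).mp h
          · exact absurd (by omega : s = a + f) hne
        · intro h
          exact Or.inl ((hmem s (by simp [psumsFrom, hs])).mpr h)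
      · exact (List.nodup_cons.mp hnd).2

lemma loop_eq (freqs : List Int) (D : Int) (hD : D = freqs.sum)
    (hnd : (psumsFrom 0 freqs).Nodup) :
    ∀ (fuel : Nat) (k : Int) (sA sB : PySem.Set Int), 1 ≤ k →
    (∀ v, v ∈ sA ↔ ∃ s ∈ psumsFrom 0 freqs, ∃ m : Int, 0 ≤ m ∧ m < k ∧ v = s + m * D) →
    (∀ v, v ∈ sB ↔ v ∈ psumsFrom 0 freqs) →
    (∀ c : Int, 1 ≤ c → c < k → ∀ s ∈ psumsFrom 0 freqs, s + c * D ∉ psumsFrom 0 freqs) →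
    pyA_loop fuel freqs (k * D) sA = pyB_loop sB D (psumsFrom 0 freqs) fuel k := by
  intro fuel
  induction fuel with
  | zero => intro k sA sB _ _ _ _; simp [pyA_loop, pyB_loop]
  | succ fuel ih =>
    intro k sA sB hk hsA hsB hnc
    -- pointwise agreement of the two membership tests in cycle k
    have hpt : ∀ s ∈ psumsFrom 0 freqs, (s + k * D ∈ sA ↔ s + k * D ∈ sB) := by
      intro s hs
      constructor
      · intro h
        obtain ⟨q, hq, m, hm0, hmk, heq⟩ := (hsA _).mp h
        by_cases hm : m = 0
        · subst hm; simp at heq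
          exact (hsB _).mpr (heq ▸ hq)
        · exfalso
          have h1 : 1 ≤ k - m := by omega
          have h2 : k - m < k := by omega
          have : s + (k - m) * D ∉ psumsFrom 0 freqs := hnc (k - m) h1 h2 s hs
          apply this
          have : q = s + (k - m) * D := by linarith [heq]
          exact this ▸ hq
      · intro h
        refine (hsA _).mpr ⟨s + k * D, (hsB _).mp h, 0, le_refl 0, by omega, by ring⟩
    have hps : (pyA_pass freqs (k * D) sA).1 = pyB_probe sB k D (psumsFrom 0 freqs) := by
      have := pass_fst freqs 0 k D sA sB hpt hnd
      rwa [zero_add] at this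
    rcases hA : pyA_pass freqs (k * D) sA with ⟨o, s1, seen1⟩
    rw [hA] at hps
    cases o with
    | some v =>
      simp only [pyA_loop, pyB_loop, hA, ← hps]
    | none =>
      simp only [pyA_loop, pyB_loop, hA, ← hps]
      have hs1 : s1 = (k + 1) * D := by
        have := pass_none_sum freqs (k * D) sA (by rw [hA])
        rw [hA] at this; simp at this
        rw [this, hD]; ring
      have hseen1 : ∀ v, v ∈ seen1 ↔ v ∈ sA ∨ v ∈ psumsFrom (k * D) freqs := by
        intro v
        have := pass_none_mem freqs (k * D) sA (by rw [hA]) v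
        rw [hA] at this; simpa using this
      have hshift : psumsFrom (k * D) freqs = (psumsFrom 0 freqs).map (fun s => s + k * D) := by
        have := psumsFrom_shift freqs 0 (k * D)
        rwa [zero_add] at this
      have hprobe : ∀ s ∈ psumsFrom 0 freqs, s + k * D ∉ sB :=
        (probe_none _ _ _ _).mp hps.symm
      rw [hs1]
      apply ih (k + 1) seen1 sB (by omega)
      · intro v
        rw [hseen1 v, hsA v, hshift]
        constructor
        · rintro (⟨s, hs, m, hm0, hmk, heq⟩ | hmap)
          · exact ⟨s, hs, m, hm0, by omega, heq⟩
          · obtain ⟨s, hs, heq⟩ := List.mem_map.mp hmap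
            exact ⟨s, hs, k, by omega, by omega, heq.symm⟩
        · rintro ⟨s, hs, m, hm0, hmk, heq⟩
          by_cases hm : m = k
          · subst hm
            exact Or.inr (List.mem_map.mpr ⟨s, hs, heq.symm⟩)
          · exact Or.inl ⟨s, hs, m, hm0, by omega, heq⟩
      · exact hsB
      · intro c hc1 hck s hs
        by_cases hck' : c = k
        · subst hck'
          intro hmem
          exact (hprobe s hs) ((hsB _).mpr hmem)
        · exact hnc c hc1 (by omega) s hs

lemma main_eq (freqs : List Int) : first_repeating freqs = first_repeating_alt freqs := by
  unfold first_repeating first_repeating_alt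
  rw [build_eq freqs 0, zero_add]
  simp only [show (PySem.Set.empty : PySem.Set Int) = [] from rfl]
  rw [scan1_eq freqs 0 ([] : PySem.Set Int)]
  rcases hA : pyA_pass freqs 0 ([] : PySem.Set Int) with ⟨o, s1, seen1⟩
  cases o with
  | some v => simp [pyA_loop, hA]
  | none =>
    simp only [pyA_loop, hA]
    have hfst : (pyA_pass freqs 0 ([] : PySem.Set Int)).1 = none := by rw [hA]
    have hs1 : s1 = freqs.sum := by
      have := pass_none_sum freqs 0 ([] : PySem.Set Int) hfst
      rw [hA] at this; simpa using this
    have hseen1 : ∀ v, v ∈ seen1 ↔ v ∈ psumsFrom 0 freqs := by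
      intro v
      have := pass_none_mem freqs 0 ([] : PySem.Set Int) hfst v
      rw [hA] at this
      simpa using this
    have hnd : (psumsFrom 0 freqs).Nodup := by
      have hscan : (pyB_scan1 (psumsFrom 0 freqs) ([] : PySem.Set Int)).1 = none := by
        rw [scan1_eq freqs 0 ([] : PySem.Set Int), hfst]
      exact (scan1_none_nodup _ _ hscan).1
    have := loop_eq freqs freqs.sum rfl hnd (pvFuel freqs) 1 seen1 seen1 (by omega)
      (by
        intro v
        rw [hseen1 v]
        constructor
        · intro hv; exact ⟨v, hv, 0, le_refl 0, by omega, by ring⟩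
        · rintro ⟨s, hs, m, hm0, hm1, heq⟩
          have : m = 0 := by omega
          subst this; simpa [heq] using hs)
      hseen1
      (by intro c hc1 hc2; omega)
    rw [hs1, ← this]
    norm_num

-- ===== VERDICT (by name: the statement is the Claim_ definition above) =====
theorem first_repeating_spec : Claim_equal_first_repeating := by
  intro freqs _
  unfold Spec_first_repeating
  exact main_eq freqs
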